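-- pv_equiv track=rewrite | github.com/mijahauan/sigmond | lib/sigmond/coordination.py | _env_key
-- ===== SOURCE A (Python) =====
-- def _env_key(*parts) -> str:
--     """Build an ENV_KEY from pieces, uppercasing and sanitizing."""
--     raw = '_'.join(str(p) for p in parts if p)
--     out = []
--     for ch in raw:
--         if ch.isalnum():
--             out.append(ch.upper())
--         else:
--             out.append('_')
--     # Collapse runs of underscores.
--     collapsed = []
--     prev_underscore = False
--     for ch in out:
--         if ch == '_':
--             if not prev_underscore:
--                 collapsed.append(ch)
--             prev_underscore = True
--         else:
--             collapsed.append(ch)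
--             prev_underscore = False
--     return ''.join(collapsed).strip('_')
-- ===== SOURCE B (Python) =====
-- def _env_key(*parts) -> str:
--     """Build an ENV_KEY from pieces, uppercasing and sanitizing."""
--     raw = '_'.join(str(p) for p in parts if p)
--     return '_'.join(_alnum_runs(raw))
--
--
-- def _alnum_runs(s):
--     """Maximal runs of alphanumeric characters of s, uppercased, in order."""
--     runs = []
--     i, n = 0, len(s)
--     while i < n:
--         if s[i].isalnum():
--             j = i
--             while j < n and s[j].isalnum():
--                 j += 1
--             runs.append(s[i:j].upper())
--             i = j
--         else:
--             i += 1
--     return runs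
-- ===== Notes on version B (the rewrite author's own statement) =====
-- stated objective: alternative
-- what changed: A maps every char to its sanitized form, then runs a stateful underscore-collapsing pass and strips '_' from both ends; B does one forward scan that extracts the maximal alphanumeric runs, uppercases them and joins them with '_', so the collapse state machine and the final strip disappear.
import Mathlib
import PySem

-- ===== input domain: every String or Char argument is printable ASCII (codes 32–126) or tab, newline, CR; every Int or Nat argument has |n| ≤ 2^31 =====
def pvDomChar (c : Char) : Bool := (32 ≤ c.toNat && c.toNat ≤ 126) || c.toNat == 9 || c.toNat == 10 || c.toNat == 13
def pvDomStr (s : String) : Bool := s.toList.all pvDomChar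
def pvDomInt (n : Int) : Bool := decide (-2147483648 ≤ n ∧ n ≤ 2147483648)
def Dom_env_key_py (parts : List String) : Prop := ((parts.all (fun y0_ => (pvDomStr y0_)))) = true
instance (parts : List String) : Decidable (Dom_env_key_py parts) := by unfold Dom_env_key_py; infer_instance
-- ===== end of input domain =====

-- B replaces A's three-pass sanitize / collapse-underscores / strip pipeline by a single
-- scan that extracts the maximal alphanumeric runs, uppercases them and joins them with '_'.


-- ===== PORT A =====
-- The tester calls _env_key(parts) with the whole list as the single argument, so the
-- *parts tuple holds one element and raw = '' for [] and str(parts) otherwise.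
-- str(list) = '[' + ', '.join(repr(x) for x) + ']'; repr of a str is ported by hand
-- below, exact on the printable-ASCII + tab/newline/CR domain (quote choice and the
-- \\, \n, \r, \t and quote escapes; all other domain chars are kept verbatim).
def pyReprChar (q c : Char) : List Char :=
  if c = '\\' then ['\\', '\\']
  else if c = '\n' then ['\\', 'n']
  else if c = '\r' then ['\\', 'r']
  else if c = '\t' then ['\\', 't']
  else if c = q then ['\\', q]
  else [c]

def pyReprStr (s : String) : List Char :=
  let q := if s.toList.contains '\'' && !(s.toList.contains '"') then '"' else '\''
  q :: s.toList.flatMap (pyReprChar q) ++ [q]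

def pyStrOfList (parts : List String) : List Char :=
  '[' :: PySem.Chars.join [',', ' '] (parts.map pyReprStr) ++ [']']

-- raw = '_'.join(str(p) for p in parts if p), with parts the one-element *args tuple
def rawOf (parts : List String) : List Char :=
  if parts = [] then [] else pyStrOfList parts

-- one step of A's sanitizing loop: out.append(ch.upper() if ch.isalnum() else '_')
def aSanStep (out : List Char) (ch : Char) : List Char :=
  if PySem.Chars.isalnum ch then out ++ [PySem.Chars.upperChar ch] else out ++ ['_']

-- one step of A's underscore-collapsing loop; state = (collapsed, prev_underscore)
def aColStep (st : List Char × Bool) (ch : Char) : List Char × Bool :=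
  if ch = '_' then
    (if st.2 then st.1 else st.1 ++ ['_'], true)
  else
    (st.1 ++ [ch], false)

def env_key_py (parts : List String) : String :=
  let raw := rawOf parts
  let out := raw.foldl aSanStep []
  let collapsed := (out.foldl aColStep ([], false)).1
  PySem.Str.stripChars (String.ofList collapsed) "_"

-- ===== PORT B =====
-- B's forward scan: skip a non-alnum char, or take the maximal alnum run, uppercased
def alnumRuns : List Char → List (List Char)
  | [] => []
  | c :: rest =>
    if PySem.Chars.isalnum c then
      ((c :: rest).takeWhile PySem.Chars.isalnum).map PySem.Chars.upperChar
        :: alnumRuns ((c :: rest).dropWhile PySem.Chars.isalnum)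
    else alnumRuns rest
termination_by cs => cs.length
decreasing_by
  · simp only [List.dropWhile_cons, *, if_pos]
    exact Nat.lt_succ_of_le (List.length_dropWhile_le _ _)
  · simp

def env_key_py_alt (parts : List String) : String :=
  let raw := rawOf parts
  String.ofList (PySem.Chars.join ['_'] (alnumRuns raw))

-- ===== PRECONDITION & SPEC =====
def Spec_env_key_py (parts : List String) (out : String) : Prop := out = env_key_py_alt parts
instance (parts : List String) (out : String) : Decidable (Spec_env_key_py parts out) := by unfold Spec_env_key_py; infer_instance

-- ===== CLAIM (what is proved, stated in full; the proofs are below) =====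
def Claim_equal_env_key_py : Prop := ∀ (parts : List String), Dom_env_key_py parts → Spec_env_key_py parts (env_key_py parts)

-- ===== LEMMAS AND PROOFS =====

-- A's sanitizing map, as a function on one char
def sanChar (c : Char) : Char :=
  if PySem.Chars.isalnum c then PySem.Chars.upperChar c else '_'

-- A's collapse loop as head recursion on the already-sanitized list
def collapseRec : List Char → Bool → List Char
  | [], _ => []
  | ch :: ds, prev =>
    if ch = '_' then
      (if prev then collapseRec ds true else '_' :: collapseRec ds true)
    else ch :: collapseRec ds false

-- A's fused sanitize+collapse pass on the raw characters
def aRun : List Char → Bool → List Char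
  | [], _ => []
  | c :: cs, prev =>
    if PySem.Chars.isalnum c then PySem.Chars.upperChar c :: aRun cs false
    else if prev then aRun cs true else '_' :: aRun cs true

-- leading '_' A emits when the first raw char is not alnum
def leadPad (cs : List Char) : List Char :=
  match cs with
  | [] => []
  | c :: _ => if PySem.Chars.isalnum c then [] else ['_']

-- trailing '_' A emits when the raw string has an alnum char but ends non-alnum
def tailPad (cs : List Char) : List Char :=
  if cs.any PySem.Chars.isalnum && !(PySem.Chars.isalnum (cs.getLastD 'A')) then ['_'] else []

theorem charOfNat_toNat (n : Nat) (h : n < 55296) : (Char.ofNat n).toNat = n := by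
  have hv : n.isValidChar := Or.inl h
  rw [Char.ofNat, dif_pos hv]
  simp [Char.toNat, Char.ofNatAux]

theorem upperChar_ne_underscore (c : Char) (h : PySem.Chars.isalnum c = true) :
    PySem.Chars.upperChar c ≠ '_' := by
  have e1 : 'a'.toNat = 97 := rfl
  have e2 : 'z'.toNat = 122 := rfl
  have e3 : 'A'.toNat = 65 := rfl
  have e4 : 'Z'.toNat = 90 := rfl
  have e5 : '0'.toNat = 48 := rfl
  have e6 : '9'.toNat = 57 := rfl
  have e7 : '_'.toNat = 95 := rfl
  unfold PySem.Chars.isalnum PySem.Chars.isalpha PySem.Chars.isdigit PySem.Chars.isupper PySem.Chars.islower at h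
  simp only [Bool.or_eq_true, Bool.and_eq_true, decide_eq_true_eq, Char.le_def,
    UInt32.le_iff_toNat_le, Char.toNat_val] at h
  unfold PySem.Chars.upperChar
  split
  · next hl =>
    simp only [PySem.Chars.islower, Bool.and_eq_true, decide_eq_true_eq, Char.le_def,
      UInt32.le_iff_toNat_le, Char.toNat_val] at hl
    intro he
    have h95 : (Char.ofNat (c.toNat - 32)).toNat = '_'.toNat := by rw [he]
    rw [charOfNat_toNat _ (by omega)] at h95
    omega
  · next hl =>
    intro he
    have h95 : c.toNat = '_'.toNat := by rw [he]
    rcases h with (⟨h1, h2⟩ | ⟨h1, h2⟩) | ⟨h1, h2⟩ <;> omega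

theorem sanStep_fold (cs : List Char) : cs.foldl aSanStep [] = cs.map sanChar := by
  have key : ∀ (cs acc : List Char), cs.foldl aSanStep acc = acc ++ cs.map sanChar := by
    intro cs
    induction cs with
    | nil => simp
    | cons c cs ih =>
      intro acc
      simp only [List.foldl_cons, List.map_cons, ih, aSanStep, sanChar]
      split <;> simp
  simpa using key cs []

theorem colStep_fold (ds : List Char) (acc : List Char) (prev : Bool) :
    (ds.foldl aColStep (acc, prev)).1 = acc ++ collapseRec ds prev := by
  induction ds generalizing acc prev with
  | nil => simp [collapseRec]
  | cons ch ds ih =>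
    simp only [List.foldl_cons, aColStep, collapseRec]
    split
    · cases prev <;> simp [ih]
    · simp [ih]

theorem collapse_map (cs : List Char) (prev : Bool) :
    collapseRec (cs.map sanChar) prev = aRun cs prev := by
  induction cs generalizing prev with
  | nil => simp [collapseRec, aRun]
  | cons c cs ih =>
    simp only [List.map_cons, collapseRec, aRun, sanChar]
    by_cases h : PySem.Chars.isalnum c = true
    · simp [h, upperChar_ne_underscore c h, ih]
    · simp only [Bool.not_eq_true] at h
      simp [h, ih]

theorem aRun_false (cs : List Char) :
    aRun cs false = leadPad cs ++ aRun cs true := by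
  cases cs with
  | nil => rfl
  | cons c cs =>
    simp only [aRun, leadPad]
    split <;> simp

theorem runs_chars (cs : List Char) :
    ∀ r ∈ alnumRuns cs, r ≠ [] ∧ ∀ x ∈ r, x ≠ '_' := by
  induction cs using alnumRuns.induct with
  | case1 => simp [alnumRuns]
  | case2 c rest h ih =>
    intro r hr
    rw [alnumRuns, if_pos h] at hr
    rcases List.mem_cons.1 hr with rfl | hr
    · constructor
      · simp [h]
      · intro x hx
        rcases List.mem_map.1 hx with ⟨a, ha, rfl⟩
        exact upperChar_ne_underscore a (List.mem_takeWhile_imp ha)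
    · exact ih r hr
  | case3 c rest h ih =>
    intro r hr
    rw [alnumRuns, if_neg h] at hr
    exact ih r hr

theorem runs_nil_iff (cs : List Char) :
    alnumRuns cs = [] ↔ cs.any PySem.Chars.isalnum = false := by
  induction cs using alnumRuns.induct with
  | case1 => simp [alnumRuns]
  | case2 c rest h ih =>
    rw [alnumRuns, if_pos h]
    simp [h]
  | case3 c rest h ih =>
    rw [alnumRuns, if_neg h]
    simp only [Bool.not_eq_true] at h
    simp [h, ih]

theorem alnumRuns_cons_not (c : Char) (cs : List Char) (h : ¬ PySem.Chars.isalnum c = true) :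
    alnumRuns (c :: cs) = alnumRuns cs := by rw [alnumRuns, if_neg h]

theorem alnumRuns_cons_cons_alnum (c d : Char) (cs : List Char)
    (hc : PySem.Chars.isalnum c = true) (_hd : PySem.Chars.isalnum d = true) :
    alnumRuns (c :: d :: cs) =
      (PySem.Chars.upperChar c :: (((d :: cs).takeWhile PySem.Chars.isalnum).map PySem.Chars.upperChar))
        :: alnumRuns ((d :: cs).dropWhile PySem.Chars.isalnum) := by
  rw [alnumRuns, if_pos hc]
  simp [List.dropWhile_cons, hc]

theorem alnumRuns_cons_alnum_not (c d : Char) (cs : List Char)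
    (hc : PySem.Chars.isalnum c = true) (hd : ¬ PySem.Chars.isalnum d = true) :
    alnumRuns (c :: d :: cs) = [PySem.Chars.upperChar c] :: alnumRuns (d :: cs) := by
  rw [alnumRuns, if_pos hc]
  simp [hc, hd]

theorem alnumRuns_alnum_shape (d : Char) (cs : List Char) (hd : PySem.Chars.isalnum d = true) :
    alnumRuns (d :: cs) =
      ((d :: cs).takeWhile PySem.Chars.isalnum).map PySem.Chars.upperChar
        :: alnumRuns ((d :: cs).dropWhile PySem.Chars.isalnum) := by
  rw [alnumRuns, if_pos hd]

theorem join_cons_head (x : Char) (a : List Char) (R : List (List Char)) :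
    PySem.Chars.join ['_'] ((x :: a) :: R) = x :: PySem.Chars.join ['_'] (a :: R) := by
  cases R with
  | nil => simp [PySem.Chars.join_singleton]
  | cons r R => simp [PySem.Chars.join_cons_cons]

theorem tailPad_cons_of_ne_nil (c : Char) (cs : List Char) (hne : cs ≠ [])
    (hany : (c :: cs).any PySem.Chars.isalnum = cs.any PySem.Chars.isalnum ∨
            ((c :: cs).any PySem.Chars.isalnum = true ∧ cs.any PySem.Chars.isalnum = true)) :
    tailPad (c :: cs) = tailPad cs := by
  have hl : (c :: cs).getLastD 'A' = cs.getLastD 'A' := by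
    cases cs with
    | nil => exact absurd rfl hne
    | cons d t => simp [List.getLastD_eq_getLast?, List.getLast?_cons_cons]
  unfold tailPad
  rw [hl]
  rcases hany with h | ⟨h1, h2⟩
  · rw [h]
  · rw [h1, h2]

theorem aRun_true (cs : List Char) :
    aRun cs true = PySem.Chars.join ['_'] (alnumRuns cs) ++ tailPad cs := by
  induction cs with
  | nil => simp [aRun, alnumRuns, tailPad, PySem.Chars.join_nil]
  | cons c cs ih =>
    by_cases hc : PySem.Chars.isalnum c = true
    · rw [show aRun (c :: cs) true = PySem.Chars.upperChar c :: aRun cs false by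
        simp [aRun, hc]]
      rw [aRun_false, ih]
      cases cs with
      | nil =>
        simp [leadPad, alnumRuns, tailPad, PySem.Chars.join_singleton, List.getLastD, hc]
      | cons d t =>
        by_cases hd : PySem.Chars.isalnum d = true
        · -- the alnum run continues into the tail
          rw [alnumRuns_cons_cons_alnum c d t hc hd, alnumRuns_alnum_shape d t hd,
              join_cons_head, tailPad_cons_of_ne_nil c (d :: t) (by simp)
                (Or.inr ⟨by simp [hc], by simp [hd]⟩)]
          simp [leadPad, hd]
        · -- c is a run of length one
          rw [alnumRuns_cons_alnum_not c d t hc hd]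
          rcases h0 : alnumRuns (d :: t) with _ | ⟨r, R⟩
          · -- no alnum char in the tail: A leaves a trailing '_'
            have hany : (d :: t).any PySem.Chars.isalnum = false := (runs_nil_iff _).1 h0
            have hlast : PySem.Chars.isalnum ((d :: t).getLast?.getD 'A') = false := by
              have hmem : (d :: t).getLast?.getD 'A' ∈ d :: t := by
                cases h : (d :: t).getLast? with
                | none => simp at h
                | some x => simpa using List.mem_of_getLast? h
              have := List.any_eq_false.1 hany _ hmem
              simpa using this
            have ht : tailPad (d :: t) = [] := by simp [tailPad, hany]
            have ht2 : tailPad (c :: d :: t) = ['_'] := by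
              have hl : (c :: d :: t).getLastD 'A' = (d :: t).getLastD 'A' := by
                simp [List.getLastD_eq_getLast?, List.getLast?_cons_cons]
              simp only [tailPad, hl]
              simp [hc, hlast]
            rw [ht, ht2]
            simp [leadPad, hd, PySem.Chars.join_nil, PySem.Chars.join_singleton]
          · -- another alnum run exists in the tail
            have hany : (d :: t).any PySem.Chars.isalnum = true := by
              by_contra h
              simp only [Bool.not_eq_true] at h
              rw [(runs_nil_iff _).2 h] at h0
              exact absurd h0 (by simp)
            rw [tailPad_cons_of_ne_nil c (d :: t) (by simp) (Or.inr ⟨by simp [hc], hany⟩)]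
            simp [leadPad, hd, PySem.Chars.join_cons_cons]
    · rw [show aRun (c :: cs) true = aRun cs true by simp [aRun, hc]]
      rw [ih, alnumRuns_cons_not c cs hc]
      cases cs with
      | nil => simp [tailPad]
      | cons d t =>
        rw [tailPad_cons_of_ne_nil c (d :: t) (by simp)
          (Or.inl (by simp only [Bool.not_eq_true] at hc; simp [hc]))]

theorem strip_pad (j pre post : List Char)
    (hpre : ∀ x ∈ pre, x = '_') (hpost : ∀ x ∈ post, x = '_')
    (hhead : ∀ h, j.head? = some h → h ≠ '_')
    (hlast : ∀ l, j.getLast? = some l → l ≠ '_') :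
    PySem.Chars.stripChars (pre ++ j ++ post) ['_'] = j := by
  show (List.dropWhile (fun c => ['_'].contains c)
      (List.dropWhile (fun c => ['_'].contains c) (pre ++ j ++ post)).reverse).reverse = j
  have hdropAll : ∀ (l : List Char), (∀ x ∈ l, x = '_') →
      l.dropWhile (fun c => ['_'].contains c) = [] := by
    intro l
    induction l with
    | nil => intro _; rfl
    | cons a l ih =>
      intro hl
      have ha := hl a (by simp)
      rw [List.dropWhile_cons, if_pos (by simp [ha])]
      exact ih (fun x hx => hl x (by simp [hx]))
  have hdropPre : ∀ (pre l : List Char), (∀ x ∈ pre, x = '_') →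
      (pre ++ l).dropWhile (fun c => ['_'].contains c) = l.dropWhile (fun c => ['_'].contains c) := by
    intro pre l
    induction pre with
    | nil => intro _; rfl
    | cons a p ih =>
      intro hl
      have ha := hl a (by simp)
      rw [List.cons_append, List.dropWhile_cons, if_pos (by simp [ha])]
      exact ih (fun x hx => hl x (by simp [hx]))
  have hdropNone : ∀ (l : List Char), (∀ h, l.head? = some h → h ≠ '_') →
      l.dropWhile (fun c => ['_'].contains c) = l := by
    intro l hl
    cases l with
    | nil => rfl
    | cons a l =>
      rw [List.dropWhile_cons]
      have := hl a rfl
      simp [this]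
  cases hj : j with
  | nil =>
    rw [hj] at *
    simp only [List.append_nil]
    rw [hdropPre _ _ hpre, hdropAll _ hpost]
    simp
  | cons a l =>
    rw [← hj]
    have hjne : j ≠ [] := by rw [hj]; simp
    rw [List.append_assoc, hdropPre _ _ hpre]
    have h1 : (j ++ post).dropWhile (fun c => ['_'].contains c) = j ++ post := by
      apply hdropNone
      intro h hh
      rw [List.head?_append_of_ne_nil _ hjne] at hh
      exact hhead h hh
    rw [h1, List.reverse_append]
    rw [hdropPre _ _ (by intro x hx; exact hpost x (by simpa using hx))]
    have h2 : j.reverse.dropWhile (fun c => ['_'].contains c) = j.reverse := by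
      apply hdropNone
      intro h hh
      rw [List.head?_reverse] at hh
      exact hlast h hh
    rw [h2, List.reverse_reverse]

theorem join_ne_nil (r : List Char) (R : List (List Char)) (hr : r ≠ []) :
    PySem.Chars.join ['_'] (r :: R) ≠ [] := by
  cases R with
  | nil => simpa [PySem.Chars.join_singleton] using hr
  | cons s R => simp [PySem.Chars.join_cons_cons, hr]

theorem join_head_ne (rs : List (List Char))
    (h : ∀ r ∈ rs, r ≠ [] ∧ ∀ x ∈ r, x ≠ '_') :
    ∀ c, (PySem.Chars.join ['_'] rs).head? = some c → c ≠ '_' := by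
  cases rs with
  | nil => simp [PySem.Chars.join_nil]
  | cons r R =>
    intro c hc
    obtain ⟨hne, hch⟩ := h r (by simp)
    have hh : (PySem.Chars.join ['_'] (r :: R)).head? = r.head? := by
      cases R with
      | nil => simp [PySem.Chars.join_singleton]
      | cons s R => rw [PySem.Chars.join_cons_cons, List.append_assoc,
          List.head?_append_of_ne_nil _ hne]
    rw [hh] at hc
    exact hch c (List.mem_of_mem_head? hc)

theorem join_last_ne (rs : List (List Char))
    (h : ∀ r ∈ rs, r ≠ [] ∧ ∀ x ∈ r, x ≠ '_') :
    ∀ c, (PySem.Chars.join ['_'] rs).getLast? = some c → c ≠ '_' := by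
  induction rs with
  | nil => simp [PySem.Chars.join_nil]
  | cons r R ih =>
    intro c hc
    obtain ⟨hne, hch⟩ := h r (by simp)
    cases R with
    | nil =>
      rw [PySem.Chars.join_singleton] at hc
      exact hch c (List.mem_of_getLast? hc)
    | cons s R =>
      rw [PySem.Chars.join_cons_cons] at hc
      obtain ⟨hsne, -⟩ := h s (by simp)
      have hjoin : PySem.Chars.join ['_'] (s :: R) ≠ [] := join_ne_nil s R hsne
      rw [List.getLast?_append_of_ne_nil _ hjoin] at hc
      exact ih (fun r' hr' => h r' (by simp [hr'])) c hc

theorem strip_main (cs : List Char) :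
    PySem.Chars.stripChars (aRun cs false) ['_'] = PySem.Chars.join ['_'] (alnumRuns cs) := by
  rw [aRun_false, aRun_true, ← List.append_assoc]
  apply strip_pad
  · intro x hx
    unfold leadPad at hx
    cases cs with
    | nil => simp at hx
    | cons c cs =>
      by_cases h : PySem.Chars.isalnum c = true
      · simp [h] at hx
      · simp [h] at hx; exact hx
  · intro x hx
    unfold tailPad at hx
    split at hx
    · simpa using hx
    · simp at hx
  · exact join_head_ne _ (runs_chars cs)
  · exact join_last_ne _ (runs_chars cs)

-- ===== VERDICT (by name: the statement is the Claim_ definition above) =====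
theorem env_key_py_spec : Claim_equal_env_key_py := by
  have main : ∀ (raw : List Char),
      PySem.Str.stripChars
        (String.ofList (((raw.foldl aSanStep []).foldl aColStep ([], false)).1)) "_"
      = String.ofList (PySem.Chars.join ['_'] (alnumRuns raw)) := by
    intro raw
    rw [sanStep_fold, colStep_fold, List.nil_append, collapse_map, PySem.Str.stripChars]
    congr 1
    rw [show (String.ofList (aRun raw false)).toList = aRun raw false by simp,
        show ("_" : String).toList = ['_'] from rfl]
    exact strip_main _
  intro parts _
  exact main (rawOf parts)
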